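-- pv_equiv track=rewrite | github.com/leehunkyu00/codingquiz | programmers/morespicy.py | solution
-- ===== SOURCE A (Python) =====
-- def solution(scoville, K):
--     try:
--         answer = 0
--         score = 0
--
--         scoville.sort()
--
--         for i in range(len(scoville)):
--             if scoville[i] > K:
--                 del scoville[i:]
--                 break
--
--         while scoville[0] < K:
--             # sort
--             tmp = scoville[:2]      # slice
--             del scoville[:2]        # delete arr
--
--             # cal : arr[0] + arr[1] * 2
--             score = tmp[0] + tmp[1] * 2
--             scoville.insert(0, score)
--             scoville.sort()
--
--             answer += 1
--
--         return answer
--     except: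
--         return -1
-- ===== SOURCE B (Python) =====
-- def solution(scoville, K):
--     # No sorting at all: keep an unsorted bag (elements already above K are
--     # discarded up front, as A does after its sort) and, each round, scan for
--     # the minimum twice, combine, and append the result to the bag.
--     pot = [v for v in scoville if v <= K]
--     count = 0
--     while True:
--         if not pot:
--             return -1
--         m1 = min(pot)
--         if m1 >= K:
--             return count
--         pot.remove(m1)
--         if not pot:
--             return -1
--         m2 = min(pot)
--         pot.remove(m2)
--         pot.append(m1 + 2 * m2)
--         count += 1
-- ===== Notes on version B (the rewrite author's own statement) =====
-- stated objective: alternative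
-- what changed: A keeps the pot as a sorted list and re-sorts the whole list after every combine; B never sorts: it keeps an unsorted bag, finds the two smallest by linear min-scans each round, and appends the combined value; return value only (A mutates the caller's list in place, B does not).
import Mathlib
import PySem

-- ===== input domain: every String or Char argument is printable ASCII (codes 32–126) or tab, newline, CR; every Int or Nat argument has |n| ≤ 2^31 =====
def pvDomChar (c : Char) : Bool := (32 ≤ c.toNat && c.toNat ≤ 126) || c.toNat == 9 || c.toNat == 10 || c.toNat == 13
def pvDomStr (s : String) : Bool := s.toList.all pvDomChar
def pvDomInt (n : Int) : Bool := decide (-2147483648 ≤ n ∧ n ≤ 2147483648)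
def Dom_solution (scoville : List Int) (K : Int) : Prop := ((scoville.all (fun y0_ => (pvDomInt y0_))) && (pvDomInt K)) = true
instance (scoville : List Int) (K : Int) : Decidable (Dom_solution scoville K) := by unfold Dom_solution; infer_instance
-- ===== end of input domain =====

-- B drops sorting entirely: instead of A's sorted list (re-sorted after every combine),
-- B keeps an unsorted bag and finds the two smallest by linear min-scans each round;
-- return value only (A mutates the caller's list in place, B does not).
-- (The Nat 'fuel' arguments are totality guards only: each loop iteration shrinks the
-- list by one, so fuel = initial length is never exhausted.)

-- ===== PORT A =====
-- 'for i in range(len(scoville)): if scoville[i] > K: del scoville[i:]; break' —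
-- keeps the prefix of elements ≤ K, drops everything from the first element > K on.
def truncA (K : Int) : List Int → List Int
  | [] => []
  | x :: xs => if x > K then [] else x :: truncA K xs

-- the 'while scoville[0] < K' loop inside try/except; none = IndexError (→ -1)
def loopA (K : Int) : Nat → List Int → Int → Option Int
  | 0, _, _ => none
  | fuel + 1, xs, answer =>
    match xs with
    | [] => none                      -- scoville[0] raises IndexError
    | x :: rest =>
      if x < K then
        match rest with
        | [] => none                  -- tmp[1] raises IndexError
        | y :: rest2 =>
          -- score = tmp[0] + tmp[1] * 2; scoville.insert(0, score); scoville.sort()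
          loopA K fuel (PySem.List.sorted ((x + y * 2) :: rest2) (fun v => v) false) (answer + 1)
      else some answer

def solution (scoville : List Int) (K : Int) : Int :=
  let pot := truncA K (PySem.List.sorted scoville (fun v => v) false)
  match loopA K pot.length pot 0 with
  | some a => a
  | none => -1

-- ===== PORT B =====
-- the 'while True' loop of Source B: min / remove / remove / append, no sorting
-- (m1 ∈ pot whenever min(pot) = m1, so list.remove never raises; getD [] is never taken)
def loopB (K : Int) : Nat → List Int → Int → Int
  | 0, _, _ => -1
  | fuel + 1, pot, count =>
    match PySem.List.min? pot (fun v => v) with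
    | none => -1                                            -- 'if not pot: return -1'
    | some m1 =>
      if m1 ≥ K then count
      else
        let pot1 := (PySem.List.remove? pot m1).getD []
        match PySem.List.min? pot1 (fun v => v) with
        | none => -1                                        -- 'if not pot: return -1'
        | some m2 =>
          loopB K fuel (((PySem.List.remove? pot1 m2).getD []) ++ [m1 + 2 * m2]) (count + 1)

def solution_alt (scoville : List Int) (K : Int) : Int :=
  let pot := scoville.filter (fun v => v ≤ K)
  loopB K pot.length pot 0

-- ===== PRECONDITION & SPEC =====
def Spec_solution (scoville : List Int) (K : Int) (out : Int) : Prop := out = solution_alt scoville K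
instance (scoville : List Int) (K : Int) (out : Int) : Decidable (Spec_solution scoville K out) := by unfold Spec_solution; infer_instance

-- ===== CLAIM (what is proved, stated in full; the proofs are below) =====
def Claim_equal_solution : Prop := ∀ (scoville : List Int) (K : Int), Dom_solution scoville K → Spec_solution scoville K (solution scoville K)

-- ===== LEMMAS AND PROOFS =====

-- the min of a bag that is a permutation of a sorted nonempty list is that list's head
lemma min?_of_perm_sorted (bag : List Int) (x : Int) (rest : List Int)
    (hperm : bag.Perm (x :: rest)) (hs : (x :: rest).Pairwise (· ≤ ·)) :
    PySem.List.min? bag (fun v => v) = some x := by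
  have hne : bag ≠ [] := by
    intro h; subst h; exact (List.cons_ne_nil x rest) hperm.nil_eq.symm
  obtain ⟨m, hm⟩ := Option.ne_none_iff_exists'.mp
    (fun h => hne ((PySem.List.min?_eq_none_iff bag (fun v => v)).mp h))
  rw [hm]
  have hmmem : m ∈ bag := PySem.List.min?_mem hm
  have hxmem : x ∈ bag := hperm.mem_iff.mpr List.mem_cons_self
  have hmx : m ≤ x := PySem.List.min?_isMin hm x hxmem
  have hxm : x ≤ m := by
    rcases List.mem_cons.mp (hperm.mem_iff.mp hmmem) with rfl | hmrest
    · exact le_rfl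
    · exact (List.pairwise_cons.mp hs).1 m hmrest
  exact congrArg some (le_antisymm hmx hxm)

-- one bag per round: loopB on any permutation of A's sorted list equals loopA
lemma loop_eq (K : Int) :
    ∀ fuel (bag sl : List Int), bag.Perm sl → sl.Pairwise (· ≤ ·) → ∀ a,
    loopB K fuel bag a = match loopA K fuel sl a with | some v => v | none => -1 := by
  intro fuel
  induction fuel with
  | zero => intro bag sl _ _ a; rfl
  | succ n ih =>
    intro bag sl hperm hs a
    cases sl with
    | nil =>
      have hb : bag = [] := hperm.eq_nil
      subst hb
      simp [loopA, loopB, PySem.List.min?]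
    | cons x rest =>
      have hmin : PySem.List.min? bag (fun v => v) = some x :=
        min?_of_perm_sorted bag x rest hperm hs
      by_cases hx : x < K
      · have hxK : ¬ (x ≥ K) := by omega
        have hxbag : x ∈ bag := hperm.mem_iff.mpr List.mem_cons_self
        have hperm1 : (bag.erase x).Perm rest := by
          have := hperm.erase x; rwa [List.erase_cons_head] at this
        cases rest with
        | nil =>
          have he : bag.erase x = [] := hperm1.eq_nil
          have hnone : PySem.List.min? (bag.erase x) (fun v => v) = none := by
            rw [he]; exact (PySem.List.min?_eq_none_iff _ _).mpr rfl
          simp [loopA, loopB, hmin, hx, hxK, hnone,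
            PySem.List.remove?_eq_some_erase bag x hxbag]
        | cons y rest2 =>
          have hs1 : (y :: rest2).Pairwise (· ≤ ·) := (List.pairwise_cons.mp hs).2
          have hmin1 : PySem.List.min? (bag.erase x) (fun v => v) = some y :=
            min?_of_perm_sorted _ y rest2 hperm1 hs1
          have hybag : y ∈ bag.erase x := hperm1.mem_iff.mpr List.mem_cons_self
          have hperm2 : ((bag.erase x).erase y).Perm rest2 := by
            have := hperm1.erase y; rwa [List.erase_cons_head] at this
          have hpermNew : (((bag.erase x).erase y) ++ [x + 2 * y]).Perm
              (PySem.List.sorted ((x + y * 2) :: rest2) (fun v => v) false) := by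
            refine (List.perm_append_singleton _ _).trans ?_
            have heq2 : x + 2 * y = x + y * 2 := by ring
            rw [heq2]
            exact (hperm2.cons _).trans (PySem.List.sorted_perm _ _ _).symm
          have hsNew : (PySem.List.sorted ((x + y * 2) :: rest2) (fun v => v) false).Pairwise (· ≤ ·) := by
            have := PySem.List.sorted_pairwise ((x + y * 2) :: rest2) (fun v => v)
            simpa using this
          have hrec := ih _ _ hpermNew hsNew (a + 1)
          simp only [loopA, loopB, hmin, Option.getD_some, hx, hxK,
            PySem.List.remove?_eq_some_erase bag x hxbag, hmin1,
            PySem.List.remove?_eq_some_erase _ y hybag]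
          exact hrec
      · have hxK : x ≥ K := by omega
        simp [loopA, loopB, hmin, hx, hxK]
    
-- A's truncation of the sorted list is exactly the filter of the sorted list
lemma trunc_eq_filter (K : Int) :
    ∀ l : List Int, l.Pairwise (· ≤ ·) → truncA K l = l.filter (fun v => v ≤ K) := by
  intro l hl
  induction l with
  | nil => rfl
  | cons x xs ih =>
    obtain ⟨h1, h2⟩ := List.pairwise_cons.mp hl
    rw [truncA]
    by_cases hx : x > K
    · rw [if_pos hx]
      symm
      rw [List.filter_eq_nil_iff]
      intro y hy
      rcases List.mem_cons.mp hy with rfl | hy'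
      · simp; omega
      · have := h1 y hy'
        simp
        omega
    · rw [if_neg hx, List.filter_cons, if_pos (by simp; omega), ih h2]

-- ===== VERDICT (by name: the statement is the Claim_ definition above) =====
theorem solution_spec : Claim_equal_solution := by
  intro scoville K _
  have hps : (PySem.List.sorted scoville (fun v => v) false).Pairwise (· ≤ ·) := by
    have := PySem.List.sorted_pairwise scoville (fun v => v)
    simpa using this
  have hperm : (scoville.filter (fun v => v ≤ K)).Perm
      ((PySem.List.sorted scoville (fun v => v) false).filter (fun v => v ≤ K)) :=
    ((PySem.List.sorted_perm scoville (fun v => v) false).symm.filter _)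
  have hlen := hperm.length_eq
  simp only [Spec_solution, solution, solution_alt]
  rw [trunc_eq_filter K _ hps, ← hlen]
  exact (loop_eq K _ _ _ hperm (hps.filter _) 0).symm
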